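-- pv_equiv track=rewrite | github.com/bc6/Clara-Pretty-One-Dick | eve-8.51.857815/carbonui/control/label.py | GetTagStringValue
-- ===== SOURCE A (Python) =====
-- def GetTagStringValue(tagtofind, tagstring):
--     start = tagstring.find(tagtofind)
--     if start != -1:
--         tagBegin = tagstring[start + len(tagtofind):]
--         for checkQuote in ['"', "'"]:
--             if tagBegin.startswith(checkQuote):
--                 end = tagBegin.find(checkQuote, 1)
--                 if end != -1:
--                     return tagBegin[1:end]
-- ===== SOURCE B (Python) =====
-- def GetTagStringValue(tagtofind, tagstring):
--     m = len(tagtofind)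
--     for i in range(len(tagstring) - m + 1):
--         if tagstring[i:i + m] == tagtofind:
--             return _quotedAt(tagstring, i + m)
--     return None
--
--
-- def _quotedAt(s, j):
--     tail = s[j:]
--     if tail[:1] in ('"', "'"):
--         q = tail[0]
--         acc = []
--         for c in tail[1:]:
--             if c == q:
--                 return ''.join(acc)
--             acc.append(c)
--     return None
-- ===== Notes on version B (the rewrite author's own statement) =====
-- stated objective: alternative
-- what changed: Replaces str.find plus the two-quote startswith/find/slice staging by one explicit sliding-window index scan that compares windows to the tag and, at the first match, a character-by-character loop that builds the quoted value in an accumulator.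
import Mathlib
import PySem

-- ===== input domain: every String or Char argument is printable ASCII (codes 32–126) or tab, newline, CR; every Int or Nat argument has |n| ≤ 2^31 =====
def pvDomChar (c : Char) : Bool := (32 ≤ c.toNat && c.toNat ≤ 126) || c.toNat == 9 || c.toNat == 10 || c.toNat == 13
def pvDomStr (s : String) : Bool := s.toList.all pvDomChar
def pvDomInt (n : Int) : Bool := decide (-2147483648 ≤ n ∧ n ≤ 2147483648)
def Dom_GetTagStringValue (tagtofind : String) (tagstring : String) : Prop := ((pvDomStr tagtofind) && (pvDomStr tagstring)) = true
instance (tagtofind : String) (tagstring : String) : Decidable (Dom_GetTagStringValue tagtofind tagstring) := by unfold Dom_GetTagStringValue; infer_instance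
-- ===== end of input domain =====

-- B replaces A's str.find + two-quote startswith/find/slice staging by an explicit
-- sliding-window index scan and a character-accumulator loop; objective: alternative.

-- ===== PORT A =====
-- the 'for checkQuote in ['"', "'"]' loop with its early return
def pvLoopA (tagBegin : List Char) : List Char → Option String
  | [] => none
  | cq :: qs =>
      if PySem.Chars.startswith tagBegin [cq] then
        let e := PySem.Chars.findFrom tagBegin [cq] 1 none
        if e ≠ -1 then some (String.ofList (PySem.List.slice tagBegin (some 1) (some e)))
        else pvLoopA tagBegin qs
      else pvLoopA tagBegin qs

def GetTagStringValue (tagtofind : String) (tagstring : String) : Option String :=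
  let start := PySem.Str.find tagstring tagtofind
  if start ≠ -1 then
    pvLoopA (PySem.List.slice tagstring.toList (some (start + (tagtofind.toList.length : Int))) none) ['"', '\'']
  else none

-- ===== PORT B =====
-- the inner 'for c in tail[1:]' loop with its accumulator
def pvCollect (q : Char) (acc : List Char) : List Char → Option String
  | [] => none
  | c :: cs => if c = q then some (String.ofList acc) else pvCollect q (acc ++ [c]) cs

-- _quotedAt(s, j)
def pvQuotedAt (s : List Char) (j : Int) : Option String :=
  let tail := PySem.List.slice s (some j) none
  if PySem.List.slice tail none (some 1) = ['"'] ∨ PySem.List.slice tail none (some 1) = ['\''] then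
    match tail with
    | [] => none   -- unreachable: the guard forces tail nonempty (tail[0] never raises in B)
    | q :: ts => pvCollect q [] ts
  else none

-- the outer 'for i in range(len(tagstring) - m + 1)' loop with its early return
def pvScanB (s tag : List Char) : List Int → Option String
  | [] => none
  | i :: is =>
      if PySem.List.slice s (some i) (some (i + (tag.length : Int))) = tag then
        pvQuotedAt s (i + (tag.length : Int))
      else pvScanB s tag is

def GetTagStringValue_alt (tagtofind : String) (tagstring : String) : Option String :=
  pvScanB tagstring.toList tagtofind.toList
    (PySem.List.pyRange 0 ((tagstring.toList.length : Int) - (tagtofind.toList.length : Int) + 1))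

-- ===== PRECONDITION & SPEC =====
def Spec_GetTagStringValue (tagtofind : String) (tagstring : String) (out : Option String) : Prop := out = GetTagStringValue_alt tagtofind tagstring
instance (tagtofind : String) (tagstring : String) (out : Option String) : Decidable (Spec_GetTagStringValue tagtofind tagstring out) := by unfold Spec_GetTagStringValue; infer_instance

-- ===== CLAIM (what is proved, stated in full; the proofs are below) =====
def Claim_equal_GetTagStringValue : Prop := ∀ (tagtofind : String) (tagstring : String), Dom_GetTagStringValue tagtofind tagstring → Spec_GetTagStringValue tagtofind tagstring (GetTagStringValue tagtofind tagstring)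

-- ===== LEMMAS AND PROOFS =====

-- find points at the first occurrence, and the first occurrence determines find
theorem pvFind_eq_of_first (s sub : List Char) (j : Nat)
    (hj : sub <+: s.drop j) (hmin : ∀ i < j, ¬ sub <+: s.drop i) :
    PySem.Chars.find s sub = (j : Int) := by
  have hinf : sub <:+: s := hj.isInfix.trans (List.drop_suffix j s).isInfix
  have h0 : 0 ≤ PySem.Chars.find s sub := (PySem.Chars.find_nonneg_iff s sub).mpr hinf
  obtain ⟨h1, h2⟩ := PySem.Chars.find_spec h0
  rcases lt_trichotomy (PySem.Chars.find s sub).toNat j with h | h | h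
  · exact absurd h1 (hmin _ h)
  · omega
  · exact absurd hj (h2 j h)

-- finding one character in a cons
theorem pvFind_singleton_cons (c q : Char) (cs : List Char) :
    PySem.Chars.find (c :: cs) [q] =
      if c = q then 0
      else if PySem.Chars.find cs [q] = -1 then -1 else 1 + PySem.Chars.find cs [q] := by
  by_cases hc : c = q
  · subst hc
    rw [if_pos rfl]
    exact pvFind_eq_of_first _ _ 0 ⟨cs, rfl⟩ (by omega)
  · rw [if_neg hc]
    by_cases hf : PySem.Chars.find cs [q] = -1
    · rw [if_pos hf]
      rw [PySem.Chars.find_eq_neg_one_iff] at hf ⊢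
      intro hin
      apply hf
      have hmem : q ∈ c :: cs := by
        obtain ⟨l1, l2, hh⟩ := hin
        rw [← hh]
        simp
      rcases List.mem_cons.mp hmem with h | h
      · exact absurd h.symm hc
      · obtain ⟨l1, l2, rfl⟩ := List.append_of_mem h
        exact ⟨l1, l2, by simp⟩
    · rw [if_neg hf]
      have h0 : 0 ≤ PySem.Chars.find cs [q] := by
        have := PySem.Chars.neg_one_le_find cs [q]
        omega
      obtain ⟨h1, h2⟩ := PySem.Chars.find_spec h0
      have := pvFind_eq_of_first (c :: cs) [q] ((PySem.Chars.find cs [q]).toNat + 1)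
        (by simpa using h1)
        (by
          intro i hi
          cases i with
          | zero =>
            intro hpre
            obtain ⟨t, ht⟩ := hpre
            exact hc ((List.cons.injEq .. ▸ ht).1).symm
          | succ i' =>
            simpa using h2 i' (by omega))
      rw [this]
      omega

-- B's accumulator loop computes the take up to the first occurrence of q
theorem pvCollect_eq (q : Char) (cs : List Char) : ∀ acc : List Char,
    pvCollect q acc cs =
      if PySem.Chars.find cs [q] = -1 then none
      else some (String.ofList (acc ++ cs.take (PySem.Chars.find cs [q]).toNat)) := by
  induction cs with
  | nil =>
    intro acc
    have hnil : PySem.Chars.find [] [q] = -1 := by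
      rw [PySem.Chars.find_eq_neg_one_iff]
      simp
    simp [pvCollect, hnil]
  | cons c cs ih =>
    intro acc
    rw [pvFind_singleton_cons]
    by_cases hc : c = q
    · subst hc
      simp [pvCollect]
    · rw [if_neg hc]
      by_cases hf : PySem.Chars.find cs [q] = -1
      · simp [pvCollect, hc, hf, ih]
      · have h0 : 0 ≤ PySem.Chars.find cs [q] := by
          have := PySem.Chars.neg_one_le_find cs [q]
          omega
        have hne : ¬ (1 + PySem.Chars.find cs [q] = -1) := by omega
        have htn : (1 + PySem.Chars.find cs [q]).toNat = (PySem.Chars.find cs [q]).toNat + 1 := by omega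
        simp [pvCollect, hc, hf, hne, ih, htn]

-- the quote-found branch of A equals B's collect loop
theorem pvBranch (q : Char) (tl : List Char) :
    (if PySem.Chars.findFrom (q :: tl) [q] 1 none ≠ -1
       then some (String.ofList (PySem.List.slice (q :: tl) (some 1)
              (some (PySem.Chars.findFrom (q :: tl) [q] 1 none))))
       else none)
    = pvCollect q [] tl := by
  have hfF : PySem.Chars.findFrom (q :: tl) [q] 1 none =
      if PySem.Chars.find tl [q] = -1 then -1 else 1 + PySem.Chars.find tl [q] := by
    rw [show (1 : Int) = ((1 : Nat) : Int) by simp,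
      PySem.Chars.findFrom_natCast _ _ 1 (by simp)]
    simp
  rw [pvCollect_eq]
  have hf := PySem.Chars.neg_one_le_find tl [q]
  by_cases hc0 : PySem.Chars.find tl [q] = -1
  · simp [hfF, hc0]
  · have hne : ¬ (1 + PySem.Chars.find tl [q] = -1) := by omega
    have hsl : PySem.List.slice (q :: tl) (some 1) (some (1 + PySem.Chars.find tl [q])) =
        tl.take (PySem.Chars.find tl [q]).toNat := by
      rw [PySem.List.slice_toNat]
      · simp
        omega
      · norm_num
      · omega
    simp [hfF, hc0, hne, hsl]

-- A's quote loop and B's _quotedAt agree on the remainder string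
theorem pvCore (rest : List Char) :
    (if PySem.List.slice rest none (some 1) = ['"'] ∨ PySem.List.slice rest none (some 1) = ['\''] then
      (match rest with
       | [] => none
       | q :: ts => pvCollect q [] ts)
     else none) = pvLoopA rest ['"', '\''] := by
  match rest with
  | [] => decide
  | q :: tl =>
    have hsw : ∀ c : Char, (PySem.Chars.startswith (q :: tl) [c] = true) ↔ c = q := by
      intro c
      rw [PySem.Chars.startswith_iff, List.cons_prefix_cons]
      simp
    have hfalse : ∀ c : Char, c ≠ q → PySem.Chars.startswith (q :: tl) [c] = false := by
      intro c hcq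
      cases hb : PySem.Chars.startswith (q :: tl) [c] with
      | false => rfl
      | true => exact absurd ((hsw c).mp hb) hcq
    have hslice : PySem.List.slice (q :: tl) none (some 1) = [q] := by
      rw [show (1 : Int) = ((1 : Nat) : Int) by simp, PySem.List.slice_to_natCast]
      simp
    rw [hslice]
    by_cases hq1 : q = '"'
    · subst hq1
      have h2 : PySem.Chars.startswith ('"' :: tl) ['\''] = false := hfalse _ (by decide)
      simp only [pvLoopA, (hsw '"').mpr rfl, h2, if_true, if_false, Bool.false_eq_true]
      simpa using (pvBranch '"' tl).symm
    · by_cases hq2 : q = '\''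
      · subst hq2
        have h1 : PySem.Chars.startswith ('\'' :: tl) ['"'] = false := hfalse _ (by decide)
        simp only [pvLoopA, (hsw '\'').mpr rfl, h1, if_true, if_false, Bool.false_eq_true]
        simpa using (pvBranch '\'' tl).symm
      · have h1 : PySem.Chars.startswith (q :: tl) ['"'] = false := hfalse _ (Ne.symm hq1)
        have h2 : PySem.Chars.startswith (q :: tl) ['\''] = false := hfalse _ (Ne.symm hq2)
        have hg : ¬ ([q] = ['"'] ∨ [q] = ['\'']) := by simp [hq1, hq2]
        simp [pvLoopA, h1, h2, hq1, hq2]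

-- A's quote loop and B's _quotedAt agree on the remainder string
theorem pvQuoted_eq (s : List Char) (x : Int) :
    pvQuotedAt s x = pvLoopA (PySem.List.slice s (some x) none) ['"', '\''] :=
  pvCore (PySem.List.slice s (some x) none)

-- the window test of B is the prefix test at that index
theorem pvSlice_eq_tag_iff (s tag : List Char) (k : Nat) :
    (PySem.List.slice s (some (k : Int)) (some ((k : Int) + (tag.length : Int))) = tag)
      ↔ tag <+: s.drop k := by
  rw [PySem.List.slice_toNat s (by positivity) (by positivity)]
  have h : ((k : Int) + (tag.length : Int)).toNat - (k : Int).toNat = tag.length := by omega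
  rw [h, show ((k : Int)).toNat = k by omega, List.prefix_iff_eq_take]
  constructor <;> intro hh <;> exact hh.symm

-- when the tag occurs nowhere, B's scan returns none
theorem pvScan_none (s tag : List Char) (h : PySem.Chars.find s tag = -1) :
    ∀ idxs : List Int, (∀ i ∈ idxs, 0 ≤ i) → pvScanB s tag idxs = none := by
  intro idxs
  induction idxs with
  | nil => intro _; rfl
  | cons i is ih =>
    intro hpos
    have hi : 0 ≤ i := hpos i (by simp)
    have hcast : i = ((i.toNat : Nat) : Int) := by omega
    unfold pvScanB
    rw [if_neg, ih (fun j hj => hpos j (by simp [hj]))]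
    rw [hcast, pvSlice_eq_tag_iff]
    intro hpre
    rw [PySem.Chars.find_eq_neg_one_iff] at h
    exact h (hpre.isInfix.trans (List.drop_suffix _ s).isInfix)

-- when the first occurrence of the tag is at j, B's scan from any k ≤ j lands there
theorem pvScan_found (s tag : List Char) (j : Nat)
    (hj : tag <+: s.drop j) (hmin : ∀ i < j, ¬ tag <+: s.drop i)
    (hlt : (j : Int) < (s.length : Int) - (tag.length : Int) + 1) :
    ∀ d k, k ≤ j → j - k = d →
      pvScanB s tag (PySem.List.pyRange (k : Int) ((s.length : Int) - (tag.length : Int) + 1))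
        = pvQuotedAt s ((j : Int) + (tag.length : Int)) := by
  intro d
  induction d with
  | zero =>
    intro k hk hd
    have hkj : k = j := by omega
    subst hkj
    rw [PySem.List.pyRange_one_cons (by omega)]
    unfold pvScanB
    rw [if_pos ((pvSlice_eq_tag_iff s tag k).mpr hj)]
  | succ d ih =>
    intro k hk hd
    have hklt : k < j := by omega
    rw [PySem.List.pyRange_one_cons (by omega)]
    unfold pvScanB
    rw [if_neg, show ((k : Int) + 1) = (((k + 1 : Nat)) : Int) by push_cast; ring,
      ih (k + 1) (by omega) (by omega)]
    rw [pvSlice_eq_tag_iff]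
    exact hmin k hklt

-- ===== VERDICT (by name: the statement is the Claim_ definition above) =====
theorem GetTagStringValue_spec : Claim_equal_GetTagStringValue := by
  intro tagtofind tagstring _
  unfold Spec_GetTagStringValue GetTagStringValue GetTagStringValue_alt
  have hle := PySem.Chars.neg_one_le_find tagstring.toList tagtofind.toList
  simp only [PySem.Str.find_eq]
  by_cases h : PySem.Chars.find tagstring.toList tagtofind.toList = -1
  · rw [if_neg (by simp [h]), pvScan_none _ _ h _
      (fun i hi => ((PySem.List.mem_pyRange_one).mp hi).1)]
  · have h0 : 0 ≤ PySem.Chars.find tagstring.toList tagtofind.toList := by omega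
    obtain ⟨h1, h2⟩ := PySem.Chars.find_spec h0
    set f := (PySem.Chars.find tagstring.toList tagtofind.toList).toNat with hf
    have hlen : tagtofind.toList.length ≤ tagstring.toList.length - f := by
      have := h1.length_le
      simpa using this
    have hfle : PySem.Chars.find tagstring.toList tagtofind.toList ≤ (tagstring.toList.length : Int) :=
      PySem.Chars.find_le_length _ _
    have hlt : ((f : Nat) : Int) < (tagstring.toList.length : Int) - (tagtofind.toList.length : Int) + 1 := by
      omega
    rw [show (0 : Int) = ((0 : Nat) : Int) by simp,
      pvScan_found tagstring.toList tagtofind.toList f h1 h2 hlt (f - 0) 0 (by omega) rfl]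
    rw [if_pos h, pvQuoted_eq]
    have : ((f : Nat) : Int) = PySem.Chars.find tagstring.toList tagtofind.toList := by omega
    rw [this]
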